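-- pv_equiv track=rewrite | github.com/delorenj/bloodbank | event_producers/events/types.py | get_event_category
-- ===== SOURCE A (Python) =====
-- from enum import Enum
--
-- class EventCategory(str, Enum):
--     """Broad categorization of event types."""
--
--     INFRASTRUCTURE = "infrastructure"
--     LLM = "llm"
--     AGENT = "agent"
--     EXTERNAL = "external"
--
-- def get_event_category(event_type: str) -> EventCategory:
--     """
--     Get the category for an event type.
--
--     Args:
--         event_type: The event type string (e.g., "fireflies.transcript.ready")
--
--     Returns:
--         EventCategory enum value
--
--     Raises:
--         ValueError: If event_type is not recognized
--     """
--     prefixes = {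
--         "llm.": EventCategory.LLM,
--         "agent.": EventCategory.AGENT,
--         "fireflies.": EventCategory.EXTERNAL,
--         "github.": EventCategory.EXTERNAL,
--         "meeting.": EventCategory.EXTERNAL,
--         "round.": EventCategory.EXTERNAL,
--         "participant.": EventCategory.EXTERNAL,
--         "comment.": EventCategory.EXTERNAL,
--         "artifact.": EventCategory.INFRASTRUCTURE,
--     }
--
--     for prefix, category in sorted(prefixes.items(), key=lambda x: -len(x[0])):
--         if event_type.startswith(prefix):
--             return category
--
--     raise ValueError(f"Unknown event type prefix: {event_type}")
-- ===== SOURCE B (Python) =====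
-- from enum import Enum
--
--
-- class EventCategory(str, Enum):
--     """Broad categorization of event types."""
--
--     INFRASTRUCTURE = "infrastructure"
--     LLM = "llm"
--     AGENT = "agent"
--     EXTERNAL = "external"
--
--
-- _CATEGORY_BY_PREFIX = {
--     "llm.": EventCategory.LLM,
--     "agent.": EventCategory.AGENT,
--     "fireflies.": EventCategory.EXTERNAL,
--     "github.": EventCategory.EXTERNAL,
--     "meeting.": EventCategory.EXTERNAL,
--     "round.": EventCategory.EXTERNAL,
--     "participant.": EventCategory.EXTERNAL,
--     "comment.": EventCategory.EXTERNAL,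
--     "artifact.": EventCategory.INFRASTRUCTURE,
-- }
--
--
-- def get_event_category(event_type: str) -> EventCategory:
--     """Get the category for an event type (single dict lookup, no prefix scan)."""
--     dot = event_type.find(".")
--     if dot != -1:
--         category = _CATEGORY_BY_PREFIX.get(event_type[: dot + 1])
--         if category is not None:
--             return category
--     raise ValueError(f"Unknown event type prefix: {event_type}")
-- ===== Notes on version B (the rewrite author's own statement) =====
-- stated objective: idiomatic
-- what changed: B replaces A's loop over the length-sorted prefix list (a startswith test per entry) with computing the candidate prefix directly as the slice up to and including the first dot and doing a single dict lookup.
import Mathlib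
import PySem

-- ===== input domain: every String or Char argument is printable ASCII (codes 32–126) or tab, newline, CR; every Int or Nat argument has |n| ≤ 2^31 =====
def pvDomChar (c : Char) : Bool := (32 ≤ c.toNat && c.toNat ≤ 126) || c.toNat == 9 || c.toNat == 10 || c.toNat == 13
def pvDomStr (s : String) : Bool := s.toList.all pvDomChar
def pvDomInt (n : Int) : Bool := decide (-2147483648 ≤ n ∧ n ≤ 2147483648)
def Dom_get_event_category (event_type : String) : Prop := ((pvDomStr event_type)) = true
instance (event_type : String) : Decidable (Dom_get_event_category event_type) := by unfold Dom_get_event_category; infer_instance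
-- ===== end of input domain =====

-- B replaces A's linear scan over length-sorted prefixes with a direct dict lookup of the
-- slice up to and including the first '.'; same EventCategory value (its .value string) everywhere
-- A returns (Pre_ excludes exactly the inputs where A raises ValueError).

-- ===== PORT A =====
-- the 'prefixes' dict literal of A
def pvPrefixesA : PySem.Dict String String :=
  ((((((((PySem.Dict.empty.insert "llm." "llm").insert "agent." "agent").insert
    "fireflies." "external").insert "github." "external").insert "meeting." "external").insert
    "round." "external").insert "participant." "external").insert "comment." "external").insert
    "artifact." "infrastructure"

-- A's 'for prefix, category in …: if event_type.startswith(prefix): return category'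
def pvLoopA (event_type : String) : List (String × String) → String
  | [] => ""   -- the 'raise ValueError' fall-through; excluded by Pre_
  | (pfx, category) :: rest =>
      if PySem.Str.startswith event_type pfx then category else pvLoopA event_type rest

def get_event_category (event_type : String) : String :=
  pvLoopA event_type
    (PySem.List.sorted pvPrefixesA.items (fun x => -(PySem.Str.len x.1)) false)

-- ===== PORT B =====
-- B's module-level '_CATEGORY_BY_PREFIX' dict
def pvCategoryByPrefix : PySem.Dict String String :=
  ((((((((PySem.Dict.empty.insert "llm." "llm").insert "agent." "agent").insert
    "fireflies." "external").insert "github." "external").insert "meeting." "external").insert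
    "round." "external").insert "participant." "external").insert "comment." "external").insert
    "artifact." "infrastructure"

def get_event_category_alt (event_type : String) : String :=
  let dot := PySem.Str.find event_type "."
  if dot ≠ -1 then
    match pvCategoryByPrefix.get? (PySem.Str.slice event_type none (some (dot + 1))) with
    | some category => category
    | none => ""   -- the 'raise ValueError'; excluded by Pre_
  else ""          -- the 'raise ValueError'; excluded by Pre_

-- ===== PRECONDITION & SPEC =====
-- Pre_ excludes exactly the inputs on which A raises ValueError (no recognized prefix).
def Pre_get_event_category (event_type : String) : Prop :=
  PySem.Str.startswith event_type "llm." = true ∨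
  PySem.Str.startswith event_type "agent." = true ∨
  PySem.Str.startswith event_type "fireflies." = true ∨
  PySem.Str.startswith event_type "github." = true ∨
  PySem.Str.startswith event_type "meeting." = true ∨
  PySem.Str.startswith event_type "round." = true ∨
  PySem.Str.startswith event_type "participant." = true ∨
  PySem.Str.startswith event_type "comment." = true ∨
  PySem.Str.startswith event_type "artifact." = true
instance (event_type : String) : Decidable (Pre_get_event_category event_type) := by
  unfold Pre_get_event_category; infer_instance

def pvWitness_get_event_category : String := "fireflies.transcript.ready"

def Spec_get_event_category (event_type : String) (out : String) : Prop := out = get_event_category_alt event_type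
instance (event_type : String) (out : String) : Decidable (Spec_get_event_category event_type out) := by unfold Spec_get_event_category; infer_instance

-- ===== CLAIM (what is proved, stated in full; the proofs are below) =====
def Claim_equal_get_event_category : Prop := ∀ (event_type : String), Dom_get_event_category event_type → Pre_get_event_category event_type → Spec_get_event_category event_type (get_event_category event_type)

-- ===== LEMMAS AND PROOFS =====

-- the sorted prefix list of A's loop, evaluated once (a closed term)
theorem pvSortedA_eq :
    PySem.List.sorted pvPrefixesA.items (fun x => -(PySem.Str.len x.1)) false =
    [("participant.", "external"), ("fireflies.", "external"), ("artifact.", "infrastructure"),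
     ("meeting.", "external"), ("comment.", "external"), ("github.", "external"),
     ("agent.", "agent"), ("round.", "external"), ("llm.", "llm")] := by decide

theorem pv_llm (r : List Char) :
    get_event_category (String.ofList ("llm.".toList ++ r)) =
    get_event_category_alt (String.ofList ("llm.".toList ++ r)) := by
  have hA : pvLoopA (String.ofList ("llm.".toList ++ r))
      [("participant.", "external"), ("fireflies.", "external"), ("artifact.", "infrastructure"),
       ("meeting.", "external"), ("comment.", "external"), ("github.", "external"),
       ("agent.", "agent"), ("round.", "external"), ("llm.", "llm")] = "llm" := by
    simp [pvLoopA, PySem.Str.startswith, PySem.Chars.startswith]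
  have hB : get_event_category_alt (String.ofList ("llm.".toList ++ r)) = "llm" := by
    simp only [get_event_category_alt, PySem.Str.find_eq, String.toList_ofList]
    simp [PySem.Chars.find, PySem.Chars.find.go, PySem.Str.slice]
    rw [PySem.List.slice_to _ (by norm_num)]
    have ht : List.take (Int.toNat 4) ('l' :: 'l' :: 'm' :: '.' :: r) = "llm.".toList := rfl
    rw [ht]
    decide
  rw [get_event_category, pvSortedA_eq, hA, hB]

theorem pv_agent (r : List Char) :
    get_event_category (String.ofList ("agent.".toList ++ r)) =
    get_event_category_alt (String.ofList ("agent.".toList ++ r)) := by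
  have hA : pvLoopA (String.ofList ("agent.".toList ++ r))
      [("participant.", "external"), ("fireflies.", "external"), ("artifact.", "infrastructure"),
       ("meeting.", "external"), ("comment.", "external"), ("github.", "external"),
       ("agent.", "agent"), ("round.", "external"), ("llm.", "llm")] = "agent" := by
    simp [pvLoopA, PySem.Str.startswith, PySem.Chars.startswith]
  have hB : get_event_category_alt (String.ofList ("agent.".toList ++ r)) = "agent" := by
    simp only [get_event_category_alt, PySem.Str.find_eq, String.toList_ofList]
    simp [PySem.Chars.find, PySem.Chars.find.go, PySem.Str.slice]
    rw [PySem.List.slice_to _ (by norm_num)]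
    have ht : List.take (Int.toNat 6) ('a' :: 'g' :: 'e' :: 'n' :: 't' :: '.' :: r) = "agent.".toList := rfl
    rw [ht]
    decide
  rw [get_event_category, pvSortedA_eq, hA, hB]

theorem pv_fireflies (r : List Char) :
    get_event_category (String.ofList ("fireflies.".toList ++ r)) =
    get_event_category_alt (String.ofList ("fireflies.".toList ++ r)) := by
  have hA : pvLoopA (String.ofList ("fireflies.".toList ++ r))
      [("participant.", "external"), ("fireflies.", "external"), ("artifact.", "infrastructure"),
       ("meeting.", "external"), ("comment.", "external"), ("github.", "external"),
       ("agent.", "agent"), ("round.", "external"), ("llm.", "llm")] = "external" := by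
    simp [pvLoopA, PySem.Str.startswith, PySem.Chars.startswith]
  have hB : get_event_category_alt (String.ofList ("fireflies.".toList ++ r)) = "external" := by
    simp only [get_event_category_alt, PySem.Str.find_eq, String.toList_ofList]
    simp [PySem.Chars.find, PySem.Chars.find.go, PySem.Str.slice]
    rw [PySem.List.slice_to _ (by norm_num)]
    have ht : List.take (Int.toNat 10) ('f' :: 'i' :: 'r' :: 'e' :: 'f' :: 'l' :: 'i' :: 'e' :: 's' :: '.' :: r) = "fireflies.".toList := rfl
    rw [ht]
    decide
  rw [get_event_category, pvSortedA_eq, hA, hB]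

theorem pv_github (r : List Char) :
    get_event_category (String.ofList ("github.".toList ++ r)) =
    get_event_category_alt (String.ofList ("github.".toList ++ r)) := by
  have hA : pvLoopA (String.ofList ("github.".toList ++ r))
      [("participant.", "external"), ("fireflies.", "external"), ("artifact.", "infrastructure"),
       ("meeting.", "external"), ("comment.", "external"), ("github.", "external"),
       ("agent.", "agent"), ("round.", "external"), ("llm.", "llm")] = "external" := by
    simp [pvLoopA, PySem.Str.startswith, PySem.Chars.startswith]
  have hB : get_event_category_alt (String.ofList ("github.".toList ++ r)) = "external" := by
    simp only [get_event_category_alt, PySem.Str.find_eq, String.toList_ofList]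
    simp [PySem.Chars.find, PySem.Chars.find.go, PySem.Str.slice]
    rw [PySem.List.slice_to _ (by norm_num)]
    have ht : List.take (Int.toNat 7) ('g' :: 'i' :: 't' :: 'h' :: 'u' :: 'b' :: '.' :: r) = "github.".toList := rfl
    rw [ht]
    decide
  rw [get_event_category, pvSortedA_eq, hA, hB]

theorem pv_meeting (r : List Char) :
    get_event_category (String.ofList ("meeting.".toList ++ r)) =
    get_event_category_alt (String.ofList ("meeting.".toList ++ r)) := by
  have hA : pvLoopA (String.ofList ("meeting.".toList ++ r))
      [("participant.", "external"), ("fireflies.", "external"), ("artifact.", "infrastructure"),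
       ("meeting.", "external"), ("comment.", "external"), ("github.", "external"),
       ("agent.", "agent"), ("round.", "external"), ("llm.", "llm")] = "external" := by
    simp [pvLoopA, PySem.Str.startswith, PySem.Chars.startswith]
  have hB : get_event_category_alt (String.ofList ("meeting.".toList ++ r)) = "external" := by
    simp only [get_event_category_alt, PySem.Str.find_eq, String.toList_ofList]
    simp [PySem.Chars.find, PySem.Chars.find.go, PySem.Str.slice]
    rw [PySem.List.slice_to _ (by norm_num)]
    have ht : List.take (Int.toNat 8) ('m' :: 'e' :: 'e' :: 't' :: 'i' :: 'n' :: 'g' :: '.' :: r) = "meeting.".toList := rfl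
    rw [ht]
    decide
  rw [get_event_category, pvSortedA_eq, hA, hB]

theorem pv_round (r : List Char) :
    get_event_category (String.ofList ("round.".toList ++ r)) =
    get_event_category_alt (String.ofList ("round.".toList ++ r)) := by
  have hA : pvLoopA (String.ofList ("round.".toList ++ r))
      [("participant.", "external"), ("fireflies.", "external"), ("artifact.", "infrastructure"),
       ("meeting.", "external"), ("comment.", "external"), ("github.", "external"),
       ("agent.", "agent"), ("round.", "external"), ("llm.", "llm")] = "external" := by
    simp [pvLoopA, PySem.Str.startswith, PySem.Chars.startswith]
  have hB : get_event_category_alt (String.ofList ("round.".toList ++ r)) = "external" := by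
    simp only [get_event_category_alt, PySem.Str.find_eq, String.toList_ofList]
    simp [PySem.Chars.find, PySem.Chars.find.go, PySem.Str.slice]
    rw [PySem.List.slice_to _ (by norm_num)]
    have ht : List.take (Int.toNat 6) ('r' :: 'o' :: 'u' :: 'n' :: 'd' :: '.' :: r) = "round.".toList := rfl
    rw [ht]
    decide
  rw [get_event_category, pvSortedA_eq, hA, hB]

theorem pv_participant (r : List Char) :
    get_event_category (String.ofList ("participant.".toList ++ r)) =
    get_event_category_alt (String.ofList ("participant.".toList ++ r)) := by
  have hA : pvLoopA (String.ofList ("participant.".toList ++ r))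
      [("participant.", "external"), ("fireflies.", "external"), ("artifact.", "infrastructure"),
       ("meeting.", "external"), ("comment.", "external"), ("github.", "external"),
       ("agent.", "agent"), ("round.", "external"), ("llm.", "llm")] = "external" := by
    simp [pvLoopA, PySem.Str.startswith, PySem.Chars.startswith]
  have hB : get_event_category_alt (String.ofList ("participant.".toList ++ r)) = "external" := by
    simp only [get_event_category_alt, PySem.Str.find_eq, String.toList_ofList]
    simp [PySem.Chars.find, PySem.Chars.find.go, PySem.Str.slice]
    rw [PySem.List.slice_to _ (by norm_num)]
    have ht : List.take (Int.toNat 12) ('p' :: 'a' :: 'r' :: 't' :: 'i' :: 'c' :: 'i' :: 'p' :: 'a' :: 'n' :: 't' :: '.' :: r) = "participant.".toList := rfl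
    rw [ht]
    decide
  rw [get_event_category, pvSortedA_eq, hA, hB]

theorem pv_comment (r : List Char) :
    get_event_category (String.ofList ("comment.".toList ++ r)) =
    get_event_category_alt (String.ofList ("comment.".toList ++ r)) := by
  have hA : pvLoopA (String.ofList ("comment.".toList ++ r))
      [("participant.", "external"), ("fireflies.", "external"), ("artifact.", "infrastructure"),
       ("meeting.", "external"), ("comment.", "external"), ("github.", "external"),
       ("agent.", "agent"), ("round.", "external"), ("llm.", "llm")] = "external" := by
    simp [pvLoopA, PySem.Str.startswith, PySem.Chars.startswith]
  have hB : get_event_category_alt (String.ofList ("comment.".toList ++ r)) = "external" := by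
    simp only [get_event_category_alt, PySem.Str.find_eq, String.toList_ofList]
    simp [PySem.Chars.find, PySem.Chars.find.go, PySem.Str.slice]
    rw [PySem.List.slice_to _ (by norm_num)]
    have ht : List.take (Int.toNat 8) ('c' :: 'o' :: 'm' :: 'm' :: 'e' :: 'n' :: 't' :: '.' :: r) = "comment.".toList := rfl
    rw [ht]
    decide
  rw [get_event_category, pvSortedA_eq, hA, hB]

theorem pv_artifact (r : List Char) :
    get_event_category (String.ofList ("artifact.".toList ++ r)) =
    get_event_category_alt (String.ofList ("artifact.".toList ++ r)) := by
  have hA : pvLoopA (String.ofList ("artifact.".toList ++ r))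
      [("participant.", "external"), ("fireflies.", "external"), ("artifact.", "infrastructure"),
       ("meeting.", "external"), ("comment.", "external"), ("github.", "external"),
       ("agent.", "agent"), ("round.", "external"), ("llm.", "llm")] = "infrastructure" := by
    simp [pvLoopA, PySem.Str.startswith, PySem.Chars.startswith]
  have hB : get_event_category_alt (String.ofList ("artifact.".toList ++ r)) = "infrastructure" := by
    simp only [get_event_category_alt, PySem.Str.find_eq, String.toList_ofList]
    simp [PySem.Chars.find, PySem.Chars.find.go, PySem.Str.slice]
    rw [PySem.List.slice_to _ (by norm_num)]
    have ht : List.take (Int.toNat 9) ('a' :: 'r' :: 't' :: 'i' :: 'f' :: 'a' :: 'c' :: 't' :: '.' :: r) = "artifact.".toList := rfl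
    rw [ht]
    decide
  rw [get_event_category, pvSortedA_eq, hA, hB]

-- ===== VERDICT (by name: the statement is the Claim_ definition above) =====
theorem get_event_category_spec : Claim_equal_get_event_category := by
  intro event_type _ hpre
  unfold Spec_get_event_category
  rcases hpre with h | h | h | h | h | h | h | h | h
  · obtain ⟨r, hr⟩ := (PySem.Chars.startswith_iff _ _).mp (by simpa using h)
    have hs : event_type = String.ofList ("llm.".toList ++ r) := by
      rw [show ("llm.".toList : List Char) = ['l', 'l', 'm', '.'] from rfl, hr]; simp
    rw [hs]; exact pv_llm r
  · obtain ⟨r, hr⟩ := (PySem.Chars.startswith_iff _ _).mp (by simpa using h)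
    have hs : event_type = String.ofList ("agent.".toList ++ r) := by
      rw [show ("agent.".toList : List Char) = ['a', 'g', 'e', 'n', 't', '.'] from rfl, hr]; simp
    rw [hs]; exact pv_agent r
  · obtain ⟨r, hr⟩ := (PySem.Chars.startswith_iff _ _).mp (by simpa using h)
    have hs : event_type = String.ofList ("fireflies.".toList ++ r) := by
      rw [show ("fireflies.".toList : List Char) = ['f', 'i', 'r', 'e', 'f', 'l', 'i', 'e', 's', '.'] from rfl, hr]; simp
    rw [hs]; exact pv_fireflies r
  · obtain ⟨r, hr⟩ := (PySem.Chars.startswith_iff _ _).mp (by simpa using h)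
    have hs : event_type = String.ofList ("github.".toList ++ r) := by
      rw [show ("github.".toList : List Char) = ['g', 'i', 't', 'h', 'u', 'b', '.'] from rfl, hr]; simp
    rw [hs]; exact pv_github r
  · obtain ⟨r, hr⟩ := (PySem.Chars.startswith_iff _ _).mp (by simpa using h)
    have hs : event_type = String.ofList ("meeting.".toList ++ r) := by
      rw [show ("meeting.".toList : List Char) = ['m', 'e', 'e', 't', 'i', 'n', 'g', '.'] from rfl, hr]; simp
    rw [hs]; exact pv_meeting r
  · obtain ⟨r, hr⟩ := (PySem.Chars.startswith_iff _ _).mp (by simpa using h)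
    have hs : event_type = String.ofList ("round.".toList ++ r) := by
      rw [show ("round.".toList : List Char) = ['r', 'o', 'u', 'n', 'd', '.'] from rfl, hr]; simp
    rw [hs]; exact pv_round r
  · obtain ⟨r, hr⟩ := (PySem.Chars.startswith_iff _ _).mp (by simpa using h)
    have hs : event_type = String.ofList ("participant.".toList ++ r) := by
      rw [show ("participant.".toList : List Char) = ['p', 'a', 'r', 't', 'i', 'c', 'i', 'p', 'a', 'n', 't', '.'] from rfl, hr]; simp
    rw [hs]; exact pv_participant r
  · obtain ⟨r, hr⟩ := (PySem.Chars.startswith_iff _ _).mp (by simpa using h)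
    have hs : event_type = String.ofList ("comment.".toList ++ r) := by
      rw [show ("comment.".toList : List Char) = ['c', 'o', 'm', 'm', 'e', 'n', 't', '.'] from rfl, hr]; simp
    rw [hs]; exact pv_comment r
  · obtain ⟨r, hr⟩ := (PySem.Chars.startswith_iff _ _).mp (by simpa using h)
    have hs : event_type = String.ofList ("artifact.".toList ++ r) := by
      rw [show ("artifact.".toList : List Char) = ['a', 'r', 't', 'i', 'f', 'a', 'c', 't', '.'] from rfl, hr]; simp
    rw [hs]; exact pv_artifact r
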